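-- pv_equiv track=rewrite | github.com/creative-darkstar/sparta-algorithm | 프로그래머스/0/181874. A 강조하기/A 강조하기.py | solution
-- ===== SOURCE A (Python) =====
-- def solution(myString):
--     answer = ""
--     for c in myString:
--         if c.lower() == 'a':
--             answer += c.upper()
--         else:
--             answer += c.lower()
--     return answer
-- ===== SOURCE B (Python) =====
-- def solution(myString):
--     return myString.lower().replace('a', 'A')
-- ===== Notes on version B (the rewrite author's own statement) =====
-- stated objective: idiomatic
-- what changed: Replaces the per-character branch-and-accumulate loop with a whole-string pipeline: lowercase the whole string, then replace every occurrence of the letter a with its uppercase form.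
import Mathlib
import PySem

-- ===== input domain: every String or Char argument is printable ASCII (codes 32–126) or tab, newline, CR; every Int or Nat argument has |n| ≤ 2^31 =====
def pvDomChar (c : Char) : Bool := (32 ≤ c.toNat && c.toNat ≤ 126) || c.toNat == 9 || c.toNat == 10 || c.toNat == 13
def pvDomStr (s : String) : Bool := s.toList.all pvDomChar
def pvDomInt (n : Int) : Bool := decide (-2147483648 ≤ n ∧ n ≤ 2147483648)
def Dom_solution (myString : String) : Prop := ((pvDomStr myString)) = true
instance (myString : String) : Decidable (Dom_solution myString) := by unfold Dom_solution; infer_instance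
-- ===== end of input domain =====

-- B replaces A's per-character branch-and-accumulate loop (quadratic from repeated
-- concatenation) with an idiomatic whole-string pipeline: lower() then a single replace.

-- ===== PORT A =====
def solution (myString : String) : String :=
  myString.toList.foldl
    (fun answer c =>
      if PySem.Chars.lowerChar c = 'a' then
        answer ++ String.ofList [PySem.Chars.upperChar c]
      else
        answer ++ String.ofList [PySem.Chars.lowerChar c])
    ""

-- ===== PORT B =====
def solution_alt (myString : String) : String :=
  PySem.Str.replace (PySem.Str.lower myString) "a" "A"

-- ===== PRECONDITION & SPEC =====
def Spec_solution (myString : String) (out : String) : Prop := out = solution_alt myString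
instance (myString : String) (out : String) : Decidable (Spec_solution myString out) := by unfold Spec_solution; infer_instance

-- ===== CLAIM (what is proved, stated in full; the proofs are below) =====
def Claim_equal_solution : Prop := ∀ (myString : String), Dom_solution myString → Spec_solution myString (solution myString)

-- ===== LEMMAS AND PROOFS =====

-- the per-character map A computes
def pvGA (c : Char) : Char :=
  if PySem.Chars.lowerChar c = 'a' then PySem.Chars.upperChar c else PySem.Chars.lowerChar c

lemma pvLowerChar_eq_a {c : Char} (h : PySem.Chars.lowerChar c = 'a') : c = 'a' ∨ c = 'A' := by
  unfold PySem.Chars.lowerChar at h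
  by_cases h1 : PySem.Chars.isupper c = true
  · rw [if_pos h1] at h
    unfold PySem.Chars.isupper at h1
    simp only [Bool.and_eq_true, decide_eq_true_eq] at h1
    have hlo : (65 : Nat) ≤ c.toNat := h1.1
    have hhi : c.toNat ≤ 90 := h1.2
    have ht := congrArg Char.toNat h
    rw [Char.toNat_ofNat] at ht
    rw [if_pos (Or.inl (by omega : c.toNat + 32 < 0xd800))] at ht
    have h97 : ('a' : Char).toNat = 97 := rfl
    have h65 : c.toNat = 65 := by omega
    have hofn := Char.ofNat_toNat c
    rw [h65] at hofn
    exact Or.inr (by rw [← hofn])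
  · rw [if_neg h1] at h
    exact Or.inl h

lemma pvGA_eq (c : Char) :
    pvGA c = (if PySem.Chars.lowerChar c = 'a' then 'A' else PySem.Chars.lowerChar c) := by
  unfold pvGA
  by_cases h : PySem.Chars.lowerChar c = 'a'
  · rcases pvLowerChar_eq_a h with rfl | rfl <;> simp [h] <;> decide
  · simp [h]

lemma pvFoldA (l : List Char) (acc : String) :
    (l.foldl
      (fun answer c =>
        if PySem.Chars.lowerChar c = 'a' then
          answer ++ String.ofList [PySem.Chars.upperChar c]
        else
          answer ++ String.ofList [PySem.Chars.lowerChar c]) acc).toList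
      = acc.toList ++ l.map pvGA := by
  induction l generalizing acc with
  | nil => simp
  | cons c t ih =>
    simp only [List.foldl_cons, List.map_cons]
    by_cases h : PySem.Chars.lowerChar c = 'a' <;>
      simp [h, ih, pvGA]

lemma pvReplaceGo (cs acc : List Char) (fuel : Nat) (h : cs.length ≤ fuel) :
    PySem.Chars.replace.go ['a'] ['A'] fuel cs acc
      = acc.reverse ++ cs.map (fun c => if c = 'a' then 'A' else c) := by
  induction cs generalizing fuel acc with
  | nil =>
    cases fuel <;> simp [PySem.Chars.replace.go]
  | cons c t ih =>
    cases fuel with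
    | zero => simp at h
    | succ f =>
      rw [PySem.Chars.replace.go]
      by_cases hc : c = 'a'
      · subst hc
        simp only [List.isPrefixOf, BEq.rfl, Bool.true_and, if_true]
        simp only [List.length_cons, List.length_nil, List.drop_succ_cons, List.drop_zero,
          List.reverse_cons, List.reverse_nil, List.nil_append]
        rw [ih _ _ (by simpa using Nat.le_of_succ_le_succ h)]
        simp
      · have hp : List.isPrefixOf ['a'] (c :: t) = false := by
          simp [List.isPrefixOf]
          exact fun he => hc he.symm
        rw [hp]
        simp only [Bool.false_eq_true, if_false]
        rw [ih _ _ (by simpa using Nat.le_of_succ_le_succ h)]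
        simp [hc]

-- ===== VERDICT (by name: the statement is the Claim_ definition above) =====
theorem solution_spec : Claim_equal_solution := by
  intro s _
  unfold Spec_solution solution solution_alt
  rw [← String.toList_inj]
  rw [pvFoldA, PySem.Str.toList_replace, PySem.Str.toList_lower]
  rw [(by rfl : ("a" : String).toList = ['a']), (by rfl : ("A" : String).toList = ['A'])]
  unfold PySem.Chars.replace
  simp only [List.isEmpty_cons, Bool.false_eq_true, if_false]
  rw [pvReplaceGo _ _ _ (by simp [PySem.Chars.lower])]
  simp [PySem.Chars.lower, List.map_map, pvGA_eq, Function.comp_def]
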